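-- pv_equiv track=rewrite | github.com/Aakee/AoC-2024 | aoc2024-day22.py | part2
-- ===== SOURCE A (Python) =====
-- import math
--
-- def mix(val1: int, val2: int) -> int:
--     '''Does the mix operation as per the assignment'''
--     return val1 ^ val2
--
-- def prune(val: int) -> int:
--     '''Does the prune operation as per the assignment'''
--     return val % 16777216
--
-- def next_secret_number(val: int) -> int:
--     '''Calculates the next pseudorandom value based on the previous one'''
--     val = prune(mix(val, val*64))
--     val = prune(mix(val, math.floor(val/32)))
--     val = prune(mix(val, val*2048))
--     return val
--
-- def part2(data: list) -> int:
--     '''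
--     Solution for the part 2.
--     '''
--     # Dict holding the total prices for each combination of four price changes
--     all_changes = {}
--     for idx, val in enumerate(data):
--         # Latest 4 price changes
--         latest_changes = []
--         # Prices for the four price-change combinations, if given to this monkey
--         changes_for_this_monkey = {}
--         old_price = val % 10
--         # Loop 2000 times
--         for _ in range(2000):
--             val = next_secret_number(val)
--             new_price = val % 10
--             # Add the new price difference to the list latest_changes, and drop first element if there are more than four elements
--             latest_changes.append(new_price-old_price)
--             if len(latest_changes) > 4:
--                 latest_changes = latest_changes[1:]
--             # If the list is full (four entries)
--             if len(latest_changes) >= 4: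
--                 key = ','.join([str(change) for change in latest_changes])
--                 # Save the price, if the change combintion had not been encountered before
--                 if key not in changes_for_this_monkey:
--                     changes_for_this_monkey[key] = new_price
--             old_price = new_price
--         # For each entry in this monkey's haggle dictionary, add the price to total price
--         for key, price in changes_for_this_monkey.items():
--             if key not in all_changes:
--                 all_changes[key] = 0
--             all_changes[key] += price
--     # Find and return the maximum price
--     max_price = 0
--     for key, total_price in all_changes.items():
--         if total_price > max_price:
--             max_price = total_price
--     return max_price
-- ===== SOURCE B (Python) =====
-- import math
--
-- def part2(data: list) -> int:
--     totals = {}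
--     for val in data:
--         # 1st pass: generate all 2001 secret numbers, then prices and changes
--         secrets = [val]
--         for _ in range(2000):
--             val = (val ^ (val * 64)) % 16777216
--             val = (val ^ math.floor(val / 32)) % 16777216
--             val = (val ^ (val * 2048)) % 16777216
--             secrets.append(val)
--         prices = [s % 10 for s in secrets]
--         diffs = [b - a for a, b in zip(prices, prices[1:])]
--         # 2nd pass: slide a window of 4 over the change array, first occurrence wins
--         monkey = {}
--         for i in range(len(diffs) - 3):
--             key = ','.join(str(d) for d in diffs[i:i + 4])
--             if key not in monkey:
--                 monkey[key] = prices[i + 4]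
--         for key, price in monkey.items():
--             if key not in totals:
--                 totals[key] = 0
--             totals[key] += price
--     return max((price for _, price in totals.items()), default=0)
-- ===== Notes on version B (the rewrite author's own statement) =====
-- stated objective: alternative
-- what changed: A interleaves secret generation with a rolling 4-change window and dict bookkeeping in one 2000-step loop per monkey; B first materialises the full secret/price arrays, derives the change array by zipping, then slides an index window over it to collect first-seen prices, and finishes with max(values, default=0) instead of a hand-rolled running maximum.
import Mathlib
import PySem

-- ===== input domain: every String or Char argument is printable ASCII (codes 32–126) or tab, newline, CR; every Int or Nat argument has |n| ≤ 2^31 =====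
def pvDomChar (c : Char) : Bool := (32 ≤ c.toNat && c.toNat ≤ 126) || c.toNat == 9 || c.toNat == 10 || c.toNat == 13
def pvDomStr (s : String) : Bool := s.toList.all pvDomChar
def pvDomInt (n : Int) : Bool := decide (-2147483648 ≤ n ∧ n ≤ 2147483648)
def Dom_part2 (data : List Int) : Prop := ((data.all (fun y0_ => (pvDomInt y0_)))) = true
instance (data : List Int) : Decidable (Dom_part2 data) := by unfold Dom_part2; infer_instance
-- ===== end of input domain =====

-- B re-decomposes A's single interleaved 2000-step loop into generate-prices / diff / sliding-window passes
-- (objective: alternative; same asymptotic cost).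
-- Dict representation note: the Python dicts here are used purely as key->value maps — their iteration feeds only
-- order-insensitive reductions (per-key sums and a maximum over values) — so both ports carry them as Std.HashMap
-- (no result depends on Python's dict insertion order; an association-list dict makes the 2000-step loops
-- unevaluatable in practice).

-- ===== PORT A =====
def mix (val1 val2 : Int) : Int := PySem.Int.bxor val1 val2

def prune (val : Int) : Int := PySem.Int.mod val 16777216

-- math.floor(val/32): its argument is already pruned, so 0 ≤ val < 2^24 < 2^53 and the
-- float division is exact; floor of it equals Python's val // 32 (PySem.Int.floordiv).
def next_secret_number (val : Int) : Int :=
  let v1 := prune (mix val (val * 64))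
  let v2 := prune (mix v1 (PySem.Int.floordiv v1 32))
  let v3 := prune (mix v2 (v2 * 2048))
  v3

-- ','.join([str(change) for change in changes])  (used verbatim by both Pythons)
def keyOf (changes : List Int) : String := PySem.Str.join "," (changes.map PySem.Int.toStr)

-- body of A's inner 'for _ in range(2000)' loop; state = (val, old_price, latest_changes, changes_for_this_monkey)
def stepA (st : Int × Int × List Int × Std.HashMap String Int) (_ : Int) :
    Int × Int × List Int × Std.HashMap String Int :=
  let val := next_secret_number st.1
  let new_price := PySem.Int.mod val 10
  let latest0 := st.2.2.1 ++ [new_price - st.2.1]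
  let latest := if 4 < latest0.length then PySem.List.slice latest0 (some 1) none else latest0
  let cfm :=
    if 4 ≤ latest.length then
      let key := keyOf latest
      if st.2.2.2.contains key then st.2.2.2 else st.2.2.2.insert key new_price
    else st.2.2.2
  (val, new_price, latest, cfm)

-- A's changes_for_this_monkey after the 2000 iterations
def monkeyA (val : Int) : Std.HashMap String Int :=
  ((PySem.List.pyRange 0 2000 1).foldl stepA
    (val, PySem.Int.mod val 10, ([] : List Int), (∅ : Std.HashMap String Int))).2.2.2

-- 'if key not in all_changes: all_changes[key] = 0; all_changes[key] += price'
def accA (ac : Std.HashMap String Int) (kp : String × Int) : Std.HashMap String Int :=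
  let ac1 := if ac.contains kp.1 then ac else ac.insert kp.1 0
  ac1.insert kp.1 (ac1.getD kp.1 0 + kp.2)

def part2 (data : List Int) : Int :=
  let all_changes := (PySem.List.enumerate data).foldl
    (fun ac idxval => (monkeyA idxval.2).toList.foldl accA ac) (∅ : Std.HashMap String Int)
  all_changes.toList.foldl (fun mx kp => if kp.2 > mx then kp.2 else mx) 0

-- ===== PORT B =====
-- body of B's generation loop: state = (val, secrets); the three update lines of Source B inlined
def genStep (st : Int × List Int) (_ : Int) : Int × List Int :=
  let v1 := PySem.Int.mod (PySem.Int.bxor st.1 (st.1 * 64)) 16777216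
  let v2 := PySem.Int.mod (PySem.Int.bxor v1 (PySem.Int.floordiv v1 32)) 16777216
  let v3 := PySem.Int.mod (PySem.Int.bxor v2 (v2 * 2048)) 16777216
  (v3, st.2 ++ [v3])

-- B's window scan: 'for i in range(len(diffs) - 3): …'  (prices[i+4] is in range, default never used)
def firstSeen (prices diffs : List Int) : Std.HashMap String Int :=
  (PySem.List.pyRange 0 (PySem.List.len diffs - 3) 1).foldl
    (fun mk i =>
      let key := keyOf (PySem.List.slice diffs (some i) (some (i + 4)))
      if mk.contains key then mk else mk.insert key (PySem.List.pyGetD prices (i + 4) 0))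
    (∅ : Std.HashMap String Int)

-- 'if key not in totals: totals[key] = 0; totals[key] += price'
def accB (t : Std.HashMap String Int) (kp : String × Int) : Std.HashMap String Int :=
  let t1 := if t.contains kp.1 then t else t.insert kp.1 0
  t1.insert kp.1 (t1.getD kp.1 0 + kp.2)

def part2_alt (data : List Int) : Int :=
  let totals := data.foldl
    (fun totals val0 =>
      let secrets := ((PySem.List.pyRange 0 2000 1).foldl genStep (val0, [val0])).2
      let prices := secrets.map (fun s => PySem.Int.mod s 10)
      let diffs := (prices.zip (PySem.List.slice prices (some 1) none)).map (fun ab => ab.2 - ab.1)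
      (firstSeen prices diffs).toList.foldl accB totals)
    (∅ : Std.HashMap String Int)
  match PySem.List.max? (totals.toList.map (fun p => p.2)) (fun v => v) with
  | none => 0
  | some m => m

-- ===== PRECONDITION & SPEC =====
def Spec_part2 (data : List Int) (out : Int) : Prop := out = part2_alt data
instance (data : List Int) (out : Int) : Decidable (Spec_part2 data out) := by unfold Spec_part2; infer_instance

-- ===== CLAIM (what is proved, stated in full; the proofs are below) =====
def Claim_equal_part2 : Prop := ∀ (data : List Int), Dom_part2 data → Spec_part2 data (part2 data)

-- ===== LEMMAS AND PROOFS =====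

-- the secret number after n steps, its price, and the n-th price change
def secN (v : Int) (n : Nat) : Int := next_secret_number^[n] v

def priceN (v : Int) (n : Nat) : Int := PySem.Int.mod (secN v n) 10

def difN (v : Int) (n : Nat) : Int := priceN v (n+1) - priceN v n

-- first-seen map of the windows starting at 0 .. n-4 (the common characterisation of both ports)
def mkStep (v : Int) (mk : Std.HashMap String Int) (i : Nat) : Std.HashMap String Int :=
  let key := keyOf [difN v i, difN v (i+1), difN v (i+2), difN v (i+3)]
  if mk.contains key then mk else mk.insert key (priceN v (i+4))

def mkD (v : Int) (n : Nat) : Std.HashMap String Int :=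
  (List.range (n-3)).foldl (mkStep v) (∅ : Std.HashMap String Int)

lemma window_take {α : Type} (f : Nat → α) (n k : Nat) (h : k + 4 ≤ n) :
    (((List.range n).map f).drop k).take 4 = [f k, f (k+1), f (k+2), f (k+3)] := by
  apply List.ext_getElem
  · simp; omega
  · intro i h1 h2
    have hi : i < 4 := by simpa using h2
    simp only [List.getElem_take, List.getElem_drop, List.getElem_map, List.getElem_range]
    interval_cases i <;> simp

lemma window_drop {α : Type} (f : Nat → α) (n k : Nat) (h : n = k + 4) :
    ((List.range n).map f).drop k = [f k, f (k+1), f (k+2), f (k+3)] := by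
  subst h
  have hw := window_take f (k+4) k (le_refl _)
  rwa [List.take_of_length_le (by simp)] at hw

-- one application of A's loop body, on the invariant state
lemma stepA_eq (v : Int) (n : Nat) :
    stepA (secN v n, priceN v n, ((List.range n).map (difN v)).drop (n-4), mkD v n) 0
    = (secN v (n+1), priceN v (n+1), ((List.range (n+1)).map (difN v)).drop ((n+1)-4), mkD v (n+1)) := by
  have hval : next_secret_number (secN v n) = secN v (n+1) :=
    (Function.iterate_succ_apply' next_secret_number n v).symm
  have hD1 : (List.range (n+1)).map (difN v) = (List.range n).map (difN v) ++ [difN v n] := by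
    rw [List.range_succ, List.map_append, List.map_singleton]
  have hlat0 : ((List.range n).map (difN v)).drop (n-4) ++
      [PySem.Int.mod (secN v (n+1)) 10 - priceN v n]
      = ((List.range (n+1)).map (difN v)).drop (n-4) := by
    rw [hD1, List.drop_append_of_le_length (by simp)]
    rfl
  have hlen : (((List.range (n+1)).map (difN v)).drop (n-4)).length = (n+1) - (n-4) := by simp
  simp only [stepA, hval, hlat0]
  by_cases h4 : 4 ≤ n
  · -- trim happens
    rw [if_pos (by rw [hlen]; omega)]
    rw [PySem.List.slice_from_one, ← List.drop_one, List.drop_drop]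
    have hdidx : n - 4 + 1 = (n+1) - 4 := by omega
    rw [hdidx]
    have hwin : ((List.range (n+1)).map (difN v)).drop ((n+1)-4)
        = [difN v (n-3), difN v ((n-3)+1), difN v ((n-3)+2), difN v ((n-3)+3)] := by
      have h' : (n+1) - 4 = n - 3 := by omega
      rw [h']; exact window_drop (difN v) (n+1) (n-3) (by omega)
    rw [hwin, if_pos (by simp)]
    have hmk : mkD v (n+1) = mkStep v (mkD v n) (n-3) := by
      have h' : (n+1) - 3 = (n-3) + 1 := by omega
      rw [mkD, h', List.range_succ, List.foldl_append, List.foldl_cons, List.foldl_nil]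
      rfl
    have hpr : priceN v ((n-3)+4) = priceN v (n+1) := by congr 1; omega
    rw [hmk, mkStep]
    simp only [← hwin, hpr]
    rfl
  · -- no trim: n ≤ 3; n = 3 inserts the first window, n < 3 changes nothing
    rw [if_neg (by rw [hlen]; omega)]
    by_cases h3 : n = 3
    · subst h3
      have hwin : ((List.range 4).map (difN v)).drop (3-4)
          = [difN v 0, difN v (0+1), difN v (0+2), difN v (0+3)] := by
        simpa using window_drop (difN v) 4 0 rfl
      rw [hwin, if_pos (by simp)]
      have hmk : mkD v 4 = mkStep v (mkD v 3) 0 := by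
        rw [mkD, mkD]; rfl
      rw [hmk, mkStep]
      simp only [← hwin]
      rfl
    · have hlen2 : (((List.range (n+1)).map (difN v)).drop (n-4)).length = n + 1 := by
        rw [hlen]; omega
      rw [if_neg (by rw [hlen2]; omega)]
      have h1 : n - 4 = (n+1) - 4 := by omega
      have h2 : mkD v (n+1) = mkD v n := by
        have h' : (n+1) - 3 = n - 3 := by omega
        rw [mkD, mkD, h']
      rw [h1, h2]
      rfl

lemma stepA_inv (v : Int) (n : Nat) :
    (List.range n).foldl (fun st (_ : Nat) => stepA st 0)
      (v, PySem.Int.mod v 10, ([] : List Int), (∅ : Std.HashMap String Int))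
    = (secN v n, priceN v n, ((List.range n).map (difN v)).drop (n - 4), mkD v n) := by
  induction n with
  | zero => simp [secN, priceN, mkD]
  | succ n ih =>
    conv_lhs => rw [List.range_succ]
    rw [List.foldl_append, ih, List.foldl_cons, List.foldl_nil]
    exact stepA_eq v n

lemma monkeyA_eq (v : Int) : monkeyA v = mkD v 2000 := by
  unfold monkeyA
  rw [PySem.List.pyRange_one]
  have h2000 : (((2000:Int)) - 0).toNat = 2000 := by simp
  rw [h2000, List.foldl_map]
  have hfn : (fun (st : Int × Int × List Int × Std.HashMap String Int) (k : Nat) => stepA st ((0:Int) + (k : Int)))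
      = (fun st (_ : Nat) => stepA st 0) := rfl
  rw [hfn, stepA_inv]

lemma genB_inv (v : Int) (n : Nat) :
    (List.range n).foldl (fun st (_ : Nat) => genStep st 0) (v, [v])
    = (secN v n, (List.range (n+1)).map (secN v)) := by
  induction n with
  | zero => simp [secN]
  | succ n ih =>
    rw [List.range_succ, List.foldl_append, ih, List.foldl_cons, List.foldl_nil]
    have hg : genStep (secN v n, (List.range (n+1)).map (secN v)) 0
        = (next_secret_number (secN v n), (List.range (n+1)).map (secN v) ++ [next_secret_number (secN v n)]) := rfl
    rw [hg]
    have hval : next_secret_number (secN v n) = secN v (n+1) :=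
      (Function.iterate_succ_apply' next_secret_number n v).symm
    rw [hval, List.range_succ (n := n+1), List.map_append, List.map_singleton]

lemma diffs_eq (v : Int) (n : Nat) :
    ((((List.range (n+1)).map (priceN v)).zip
        (PySem.List.slice ((List.range (n+1)).map (priceN v)) (some 1) none)).map
      (fun ab => ab.2 - ab.1))
    = (List.range n).map (difN v) := by
  rw [PySem.List.slice_from_one]
  apply List.ext_getElem
  · simp
  · intro i h1 h2
    simp [List.getElem_zip, List.getElem_tail, difN]

lemma firstSeen_eq (v : Int) :
    firstSeen ((List.range 2001).map (priceN v)) ((List.range 2000).map (difN v))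
    = mkD v 2000 := by
  unfold firstSeen
  have hlen : PySem.List.len ((List.range 2000).map (difN v)) - 3 = 1997 := by
    simp [PySem.List.len_eq]
  rw [hlen, PySem.List.pyRange_one]
  norm_num
  rw [List.foldl_map, mkD]
  show _ = (List.range 1997).foldl (mkStep v) _
  apply PySem.List.foldl_congr_mem
  intro mk k hk
  have hk' : k < 1997 := List.mem_range.mp hk
  have hcast : (k : Int) + 4 = ((k + 4 : Nat) : Int) := by push_cast; ring
  rw [hcast, PySem.List.slice_natCast, PySem.List.pyGetD_natCast]
  have h4 : k + 4 - k = 4 := by omega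
  rw [h4, window_take (difN v) 2000 k (by omega),
     PySem.List.getD_map_range (priceN v) 2001 (k+4) 0 (by omega)]
  rfl

lemma accA_eq_accB : accA = accB := rfl

lemma foldl_enumerate_snd {α β : Type} (g : α → β → α) (l : List β) : ∀ (s : Int) (init : α),
    (PySem.List.enumerate l s).foldl (fun a p => g a p.2) init = l.foldl g init := by
  induction l with
  | nil => intro s init; simp [PySem.List.enumerate_nil]
  | cons x xs ih =>
    intro s init
    rw [PySem.List.enumerate_cons, List.foldl_cons, List.foldl_cons, ih]

lemma priceN_nonneg (v : Int) (n : Nat) : 0 ≤ priceN v n :=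
  PySem.Int.mod_nonneg _ (by norm_num)

-- all values of a map are nonnegative, phrased through lookups
abbrev MapNN (m : Std.HashMap String Int) : Prop := ∀ (k : String) (w : Int), m[k]? = some w → 0 ≤ w

lemma mapNN_empty : MapNN (∅ : Std.HashMap String Int) := by
  intro k w h
  simp at h

lemma mapNN_insert (m : Std.HashMap String Int) (hm : MapNN m) (k : String) (v : Int)
    (hv : 0 ≤ v) : MapNN (m.insert k v) := by
  intro a w h
  rw [Std.HashMap.getElem?_insert] at h
  by_cases hk : (k == a) = true
  · rw [if_pos hk] at h
    cases h
    exact hv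
  · rw [if_neg hk] at h
    exact hm a w h

lemma mapNN_foldl_mkStep (v : Int) (l : List Nat) :
    ∀ (d : Std.HashMap String Int), MapNN d → MapNN (l.foldl (mkStep v) d) := by
  induction l with
  | nil => intro d hd; simpa using hd
  | cons i t ih =>
    intro d hd
    rw [List.foldl_cons]
    apply ih
    simp only [mkStep]
    split
    · exact hd
    · exact mapNN_insert d hd _ _ (priceN_nonneg v _)

lemma mkD_NN (v : Int) (n : Nat) : MapNN (mkD v n) :=
  mapNN_foldl_mkStep v _ _ mapNN_empty

lemma getD_zero_nonneg (m : Std.HashMap String Int) (hm : MapNN m) (k : String) :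
    0 ≤ m.getD k 0 := by
  rw [Std.HashMap.getD_eq_getD_getElem?]
  cases hg : m[k]? with
  | none => simp
  | some w => simpa using hm k w hg

lemma toList_nonneg (m : Std.HashMap String Int) (hm : MapNN m) :
    ∀ p ∈ m.toList, 0 ≤ p.2 := by
  rintro ⟨k, w⟩ hp
  exact hm k w (Std.HashMap.mem_toList_iff_getElem?_eq_some.mp hp)

lemma mapNN_accB (t : Std.HashMap String Int) (ht : MapNN t) (kp : String × Int)
    (hkp : 0 ≤ kp.2) : MapNN (accB t kp) := by
  simp only [accB]
  have h1 : MapNN (if t.contains kp.1 then t else t.insert kp.1 0) := by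
    split
    · exact ht
    · exact mapNN_insert t ht _ _ le_rfl
  exact mapNN_insert _ h1 _ _ (add_nonneg (getD_zero_nonneg _ h1 _) hkp)

lemma mapNN_foldl_accB (l : List (String × Int)) :
    ∀ (t : Std.HashMap String Int), (∀ p ∈ l, 0 ≤ p.2) → MapNN t →
    MapNN (l.foldl accB t) := by
  induction l with
  | nil => intro t _ ht; simpa using ht
  | cons p rest ih =>
    intro t hl ht
    rw [List.foldl_cons]
    exact ih _ (fun q hq => hl q (List.mem_cons_of_mem _ hq))
      (mapNN_accB t ht p (hl p List.mem_cons_self))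

lemma totals_NN (data : List Int) :
    MapNN (data.foldl (fun t v => (mkD v 2000).toList.foldl accB t) (∅ : Std.HashMap String Int)) := by
  have main : ∀ (l : List Int) (t : Std.HashMap String Int), MapNN t →
      MapNN (l.foldl (fun t v => (mkD v 2000).toList.foldl accB t) t) := by
    intro l
    induction l with
    | nil => intro t ht; simpa using ht
    | cons v rest ih =>
      intro t ht
      rw [List.foldl_cons]
      exact ih _ (mapNN_foldl_accB _ _ (toList_nonneg _ (mkD_NN v 2000)) ht)
  exact main data _ mapNN_empty

lemma max_fold (l : List Int) (h : ∀ w ∈ l, 0 ≤ w) :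
    l.foldl (fun mx x => if x > mx then x else mx) 0
    = match PySem.List.max? l (fun y => y) with | none => 0 | some m => m := by
  cases l with
  | nil => rfl
  | cons x t =>
    rw [PySem.List.max?_id_cons]
    have hstep : (fun (mx y : Int) => if y > mx then y else mx) = max := by
      funext a b; rw [max_def]; split_ifs <;> omega
    have hx : 0 ≤ x := h x List.mem_cons_self
    rw [hstep, List.foldl_cons, max_eq_right hx]

lemma secrets_eq (v : Int) :
    ((PySem.List.pyRange 0 2000 1).foldl genStep (v, [v])).2 = (List.range 2001).map (secN v) := by
  rw [PySem.List.pyRange_one]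
  have h2000 : (((2000:Int)) - 0).toNat = 2000 := by simp
  rw [h2000, List.foldl_map]
  have hfn : (fun (st : Int × List Int) (k : Nat) => genStep st ((0:Int) + (k : Int)))
      = (fun st (_ : Nat) => genStep st 0) := rfl
  rw [hfn, genB_inv]

lemma prices_eq (v : Int) :
    ((List.range 2001).map (secN v)).map (fun s => PySem.Int.mod s 10) = (List.range 2001).map (priceN v) := by
  rw [List.map_map]; rfl

lemma perMonkeyB (t : Std.HashMap String Int) (v : Int) :
    List.foldl accB t (firstSeen
      (List.map (fun s => PySem.Int.mod s 10) ((PySem.List.pyRange 0 2000 1).foldl genStep (v, [v])).2)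
      (List.map (fun ab => ab.2 - ab.1)
        ((List.map (fun s => PySem.Int.mod s 10) ((PySem.List.pyRange 0 2000 1).foldl genStep (v, [v])).2).zip
          (PySem.List.slice
            (List.map (fun s => PySem.Int.mod s 10) ((PySem.List.pyRange 0 2000 1).foldl genStep (v, [v])).2)
            (some 1) none)))).toList
    = List.foldl accB t (mkD v 2000).toList := by
  rw [secrets_eq, prices_eq]
  have hd := diffs_eq v 2000
  norm_num at hd
  rw [hd, firstSeen_eq]

-- ===== VERDICT (by name: the statement is the Claim_ definition above) =====
theorem part2_spec : Claim_equal_part2 := by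
  intro data _hdom
  show part2 data = part2_alt data
  simp only [part2, part2_alt]
  rw [foldl_enumerate_snd (fun ac v => (monkeyA v).toList.foldl accA ac) data 0]
  have hA : List.foldl (fun ac v => List.foldl accA ac (monkeyA v).toList) (∅ : Std.HashMap String Int) data
      = List.foldl (fun t v => List.foldl accB t (mkD v 2000).toList) (∅ : Std.HashMap String Int) data :=
    PySem.List.foldl_congr_mem _ _ _ _ (fun acc x _ => by
      rw [monkeyA_eq, accA_eq_accB])
  have hB : List.foldl (fun totals val0 =>
        List.foldl accB totals
          (firstSeen
              (List.map (fun s => PySem.Int.mod s 10)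
                ((PySem.List.pyRange 0 2000 1).foldl genStep (val0, [val0])).2)
              (List.map (fun ab => ab.2 - ab.1)
                ((List.map (fun s => PySem.Int.mod s 10)
                      ((PySem.List.pyRange 0 2000 1).foldl genStep (val0, [val0])).2).zip
                  (PySem.List.slice
                    (List.map (fun s => PySem.Int.mod s 10)
                      ((PySem.List.pyRange 0 2000 1).foldl genStep (val0, [val0])).2)
                    (some 1) none)))).toList) (∅ : Std.HashMap String Int) data
      = List.foldl (fun t v => List.foldl accB t (mkD v 2000).toList) (∅ : Std.HashMap String Int) data :=
    PySem.List.foldl_congr_mem _ _ _ _ (fun acc x _ => perMonkeyB acc x)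
  rw [hA, hB]
  set T := List.foldl (fun t v => List.foldl accB t (mkD v 2000).toList) (∅ : Std.HashMap String Int) data with hT
  have hmap : List.foldl (fun mx (kp : String × Int) => if kp.2 > mx then kp.2 else mx) 0 T.toList
      = List.foldl (fun mx x => if x > mx then x else mx) 0 (T.toList.map (fun p => p.2)) := by
    rw [List.foldl_map]
  rw [hmap]
  apply max_fold
  intro w hw
  rcases List.mem_map.mp hw with ⟨p, hp, hpw⟩
  rw [← hpw]
  exact toList_nonneg T (totals_NN data) p hp
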